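-- pv_equiv track=rewrite | github.com/Zeyrian/Python-Account-Manager | account_manager.py | get_role_report
-- ===== SOURCE A (Python) =====
-- def get_role_report(accounts: dict) -> dict:
--     to_return = {
--         "admins": None,
--         "students": None,
--         "lecturers": None,
--     }
--
--     if len(accounts) == 0:
--         return to_return
--     else:
--         to_return["admins"] = []
--         to_return["students"] = []
--         to_return["lecturers"] = []
--
--     for account in accounts:
--         role = accounts[account]['role']
--         if role == "admin":
--             to_return["admins"].append(account)
--         elif role == "student":
--             to_return["students"].append(account)
--         elif role == "lecturer":
--             to_return["lecturers"].append(account)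
--
--     return to_return
-- ===== SOURCE B (Python) =====
-- def get_role_report(accounts: dict) -> dict:
--     if len(accounts) == 0:
--         return {"admins": None, "students": None, "lecturers": None}
--     return {
--         "admins": [a for a in accounts if accounts[a]["role"] == "admin"],
--         "students": [a for a in accounts if accounts[a]["role"] == "student"],
--         "lecturers": [a for a in accounts if accounts[a]["role"] == "lecturer"],
--     }
-- ===== Notes on version B (the rewrite author's own statement) =====
-- stated objective: alternative
-- what changed: replaces A's single pass with a mutated three-entry dict and an if/elif chain by three independent filtering comprehensions over the accounts, assembled directly into the returned dict
import Mathlib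
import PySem

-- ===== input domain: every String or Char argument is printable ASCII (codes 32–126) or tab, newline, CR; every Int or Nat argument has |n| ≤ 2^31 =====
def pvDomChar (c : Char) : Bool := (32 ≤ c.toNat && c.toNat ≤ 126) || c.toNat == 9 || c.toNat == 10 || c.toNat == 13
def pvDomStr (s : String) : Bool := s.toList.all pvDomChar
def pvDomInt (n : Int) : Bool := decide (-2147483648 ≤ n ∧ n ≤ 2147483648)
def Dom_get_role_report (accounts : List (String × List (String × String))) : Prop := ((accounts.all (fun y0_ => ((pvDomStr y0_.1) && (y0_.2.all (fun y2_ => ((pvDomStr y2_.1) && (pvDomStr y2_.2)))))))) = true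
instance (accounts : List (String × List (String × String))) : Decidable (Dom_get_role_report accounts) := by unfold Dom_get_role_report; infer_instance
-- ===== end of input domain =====

-- B builds the report by three independent filtering passes (one comprehension per role)
-- instead of A's single pass mutating a three-entry dict through an if/elif chain; same cost class.

-- ===== PORT A =====
-- A-side helper: role = accounts[account]['role'] (the default "" is never used inside Pre_)
def pvRoleA (accounts : List (String × List (String × String))) (k : String) : String :=
  (PySem.Dict.get? (PySem.Dict.mk (((PySem.Dict.get? (PySem.Dict.mk accounts) k).getD []))) "role").getD ""

def get_role_report (accounts : List (String × List (String × String))) : List (String × Option (List String)) :=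
  if accounts.length == 0 then
    [("admins", none), ("students", none), ("lecturers", none)]
  else
    let st := accounts.foldl (fun (s : List String × List String × List String) p =>
      let role := pvRoleA accounts p.1
      if role == "admin" then (s.1 ++ [p.1], s.2.1, s.2.2)
      else if role == "student" then (s.1, s.2.1 ++ [p.1], s.2.2)
      else if role == "lecturer" then (s.1, s.2.1, s.2.2 ++ [p.1])
      else s) ([], [], [])
    [("admins", some st.1), ("students", some st.2.1), ("lecturers", some st.2.2)]

-- ===== PORT B =====
-- B-side helper: accounts[a]['role'] used by each comprehension's condition
def pvRoleB (accounts : List (String × List (String × String))) (k : String) : String :=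
  (PySem.Dict.get? (PySem.Dict.mk (((PySem.Dict.get? (PySem.Dict.mk accounts) k).getD []))) "role").getD ""

def get_role_report_alt (accounts : List (String × List (String × String))) : List (String × Option (List String)) :=
  if accounts.length == 0 then
    [("admins", none), ("students", none), ("lecturers", none)]
  else
    [("admins",    some ((accounts.map (·.1)).filter (fun a => pvRoleB accounts a == "admin"))),
     ("students",  some ((accounts.map (·.1)).filter (fun a => pvRoleB accounts a == "student"))),
     ("lecturers", some ((accounts.map (·.1)).filter (fun a => pvRoleB accounts a == "lecturer")))]

-- ===== PRECONDITION & SPEC =====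
-- Pre_ excludes inputs where some account's record has no "role" key: there A raises KeyError.
def Pre_get_role_report (accounts : List (String × List (String × String))) : Prop :=
  (accounts.all (fun p => p.2.any (fun kv => kv.1 == "role"))) = true
instance (accounts : List (String × List (String × String))) : Decidable (Pre_get_role_report accounts) := by unfold Pre_get_role_report; infer_instance
def pvWitness_get_role_report : (List (String × List (String × String))) :=
  [("alice", [("role", "admin")]), ("bob", [("role", "student")]), ("carol", [("role", "lecturer")]), ("dan", [("role", "guest")])]

def Spec_get_role_report (accounts : List (String × List (String × String))) (out : List (String × Option (List String))) : Prop := out = get_role_report_alt accounts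
instance (accounts : List (String × List (String × String))) (out : List (String × Option (List String))) : Decidable (Spec_get_role_report accounts out) := by unfold Spec_get_role_report; infer_instance

-- ===== CLAIM (what is proved, stated in full; the proofs are below) =====
def Claim_equal_get_role_report : Prop := ∀ (accounts : List (String × List (String × String))), Dom_get_role_report accounts → Pre_get_role_report accounts → Spec_get_role_report accounts (get_role_report accounts)

-- ===== LEMMAS AND PROOFS =====
-- the triple-accumulator fold of A is, entrywise, the three filters of B
theorem pv_fold_eq_filters (accounts l : List (String × List (String × String)))
    (s : List String × List String × List String) :
    l.foldl (fun (s : List String × List String × List String) p =>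
      let role := pvRoleA accounts p.1
      if role == "admin" then (s.1 ++ [p.1], s.2.1, s.2.2)
      else if role == "student" then (s.1, s.2.1 ++ [p.1], s.2.2)
      else if role == "lecturer" then (s.1, s.2.1, s.2.2 ++ [p.1])
      else s) s
    = (s.1 ++ (l.map (·.1)).filter (fun a => pvRoleB accounts a == "admin"),
       s.2.1 ++ (l.map (·.1)).filter (fun a => pvRoleB accounts a == "student"),
       s.2.2 ++ (l.map (·.1)).filter (fun a => pvRoleB accounts a == "lecturer")) := by
  induction l generalizing s with
  | nil => simp
  | cons p t ih =>
    rw [List.foldl_cons, ih]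
    have hAB : pvRoleB accounts p.1 = pvRoleA accounts p.1 := rfl
    simp only [List.map_cons, List.filter_cons, hAB]
    by_cases h1 : pvRoleA accounts p.1 = "admin"
    · simp [h1]
    · by_cases h2 : pvRoleA accounts p.1 = "student"
      · simp [h1, h2]
      · by_cases h3 : pvRoleA accounts p.1 = "lecturer"
        · simp [h1, h2, h3]
        · simp [h1, h2, h3]

-- ===== VERDICT (by name: the statement is the Claim_ definition above) =====
theorem get_role_report_spec : Claim_equal_get_role_report := by
  intro accounts _ _
  show get_role_report accounts = get_role_report_alt accounts
  unfold get_role_report get_role_report_alt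
  rw [pv_fold_eq_filters accounts accounts ([], [], [])]
  simp
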